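-- pv_equiv track=rewrite | github.com/ChristopherShort/tool_migrations | profiles_cpop.py | invert_concordance
-- ===== SOURCE A (Python) =====
-- def invert_concordance(groups): #=visa_group_dict.items()
--     vsc_to_group_dict = {}
--     for group, vsc_list in groups:
--         for vsc in vsc_list:
--             if vsc in vsc_to_group_dict.keys():
--                 raise ValueError("Chris - duplicate visa subclass")
--             vsc_to_group_dict[vsc] = group
--
--     return vsc_to_group_dict
-- ===== SOURCE B (Python) =====
-- def invert_concordance(groups):
--     # Build once, check uniqueness globally, then construct the inverted dict.
--     pairs = list(groups)
--     all_vsc = [vsc for _, vsc_list in pairs for vsc in vsc_list]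
--     if len(all_vsc) != len(set(all_vsc)):
--         raise ValueError("Chris - duplicate visa subclass")
--     return {vsc: group for group, vsc_list in pairs for vsc in vsc_list}
-- ===== Notes on version B (the rewrite author's own statement) =====
-- stated objective: simpler
-- what changed: Replaces the interleaved per-element membership check inside the nested loop by a build-then-check-then-construct shape: collect all subclasses, compare len(list) to len(set) once, then build the inverted dict with a single comprehension.
import Mathlib
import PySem

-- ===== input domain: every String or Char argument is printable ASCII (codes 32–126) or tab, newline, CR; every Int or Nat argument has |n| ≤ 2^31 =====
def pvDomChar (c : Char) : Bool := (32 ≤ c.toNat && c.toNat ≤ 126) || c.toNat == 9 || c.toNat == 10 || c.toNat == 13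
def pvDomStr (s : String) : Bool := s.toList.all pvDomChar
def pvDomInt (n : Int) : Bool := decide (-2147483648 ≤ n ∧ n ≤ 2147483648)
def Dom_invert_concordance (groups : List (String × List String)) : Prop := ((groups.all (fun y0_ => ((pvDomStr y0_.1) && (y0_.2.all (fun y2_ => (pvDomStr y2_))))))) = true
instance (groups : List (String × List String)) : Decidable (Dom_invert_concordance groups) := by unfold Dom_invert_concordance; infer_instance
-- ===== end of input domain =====

-- B replaces A's interleaved per-element duplicate check by a build-then-check-then-construct shape (simpler decomposition, same cost).


-- ===== PORT A =====
-- A's nested loop: the dict is threaded through an Option; 'none' is exactly where A raises ValueError (duplicate visa subclass).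
def invertA_inner (group : String) (d? : Option (PySem.Dict String String)) (vsc_list : List String) : Option (PySem.Dict String String) :=
  vsc_list.foldl
    (fun d? vsc =>
      match d? with
      | none => none
      | some d => if d.contains vsc then none else some (d.insert vsc group))
    d?

def invert_concordance (groups : List (String × List String)) : List (String × String) :=
  match groups.foldl (fun d? gv => invertA_inner gv.1 d? gv.2) (some PySem.Dict.empty) with
  | none => []          -- A raises ValueError here; such inputs are outside Pre_invert_concordance
  | some d => d.items

-- ===== PORT B =====
-- B: collect all subclasses once, check uniqueness globally via len(list) vs len(set), then build the dict by one comprehension.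
def invert_concordance_alt (groups : List (String × List String)) : List (String × String) :=
  let all_vsc := groups.flatMap (·.2)
  if all_vsc.length ≠ (PySem.Set.ofList all_vsc).length then []   -- B raises ValueError here; outside Pre_invert_concordance
  else (groups.foldl (fun d gv => gv.2.foldl (fun d vsc => d.insert vsc gv.1) d) PySem.Dict.empty).items

-- ===== PRECONDITION & SPEC =====
-- Pre_ excludes exactly the inputs with a duplicate visa subclass, on which A (and B) raise ValueError.
def Pre_invert_concordance (groups : List (String × List String)) : Prop :=
  (groups.flatMap (·.2)).Nodup
instance (groups : List (String × List String)) : Decidable (Pre_invert_concordance groups) := by unfold Pre_invert_concordance; infer_instance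

def pvWitness_invert_concordance : (List (String × List String)) :=
  [("skilled", ["189", "190"]), ("family", ["100"]), ("other", [])]

def Spec_invert_concordance (groups : List (String × List String)) (out : List (String × String)) : Prop := out = invert_concordance_alt groups
instance (groups : List (String × List String)) (out : List (String × String)) : Decidable (Spec_invert_concordance groups out) := by unfold Spec_invert_concordance; infer_instance

-- ===== CLAIM (what is proved, stated in full; the proofs are below) =====
def Claim_equal_invert_concordance : Prop := ∀ (groups : List (String × List String)), Dom_invert_concordance groups → Pre_invert_concordance groups → Spec_invert_concordance groups (invert_concordance groups)

-- ===== LEMMAS AND PROOFS =====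

-- One inner loop over a duplicate-free list of fresh keys never hits the duplicate branch.
lemma invertA_inner_eq (group : String) (vl : List String) :
    ∀ (d : PySem.Dict String String), vl.Nodup → (∀ k ∈ vl, d.contains k = false) →
      invertA_inner group (some d) vl = some (vl.foldl (fun d vsc => d.insert vsc group) d) := by
  induction vl with
  | nil => intro d _ _; rfl
  | cons x xs ih =>
    intro d hnd hfresh
    have hx : d.contains x = false := hfresh x (by simp)
    simp only [invertA_inner, List.foldl_cons, hx, Bool.false_eq_true, if_false]
    have hnd' : xs.Nodup := (List.nodup_cons.mp hnd).2
    have hxnot : x ∉ xs := (List.nodup_cons.mp hnd).1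
    exact ih (d.insert x group) hnd' (fun k hk => by
      have hne : k ≠ x := fun h => hxnot (h ▸ hk)
      rw [PySem.Dict.contains_insert]
      simp [hne, hfresh k (List.mem_cons_of_mem _ hk)])

-- Membership in a dict after the inner insert loop.
lemma contains_inner_foldl (group : String) (vl : List String) (d : PySem.Dict String String) (k : String) :
    (vl.foldl (fun d vsc => d.insert vsc group) d).contains k = true ↔ k ∈ vl ∨ d.contains k = true := by
  induction vl generalizing d with
  | nil => simp
  | cons x xs ih =>
    simp only [List.foldl_cons, ih, PySem.Dict.contains_insert]
    constructor
    · rintro (h | h)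
      · simp [h]
      · rcases (by simpa using h : k = x ∨ d.contains k = true) with h' | h'
        · exact Or.inl (by simp [h'])
        · exact Or.inr h'
    · rintro (h | h)
      · rcases List.mem_cons.mp h with h' | h'
        · exact Or.inr (by simp [h'])
        · exact Or.inl h'
      · exact Or.inr (by simp [h])

-- The outer option-threaded loop of A equals B's plain insert loop when all keys are globally fresh and duplicate-free.
lemma foldA_eq (groups : List (String × List String)) :
    ∀ (d : PySem.Dict String String), (groups.flatMap (·.2)).Nodup →
      (∀ k ∈ groups.flatMap (·.2), d.contains k = false) →
      groups.foldl (fun d? gv => invertA_inner gv.1 d? gv.2) (some d)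
        = some (groups.foldl (fun d gv => gv.2.foldl (fun d vsc => d.insert vsc gv.1) d) d) := by
  induction groups with
  | nil => intro d _ _; rfl
  | cons gv rest ih =>
    intro d hnd hfresh
    have hflat : (gv.2 ++ rest.flatMap (·.2)).Nodup := by simpa [List.flatMap_cons] using hnd
    have h1 : gv.2.Nodup := hflat.of_append_left
    have hsplit := List.nodup_append.mp hflat
    simp only [List.foldl_cons]
    rw [invertA_inner_eq gv.1 gv.2 d h1
        (fun k hk => hfresh k (by rw [List.flatMap_cons]; exact List.mem_append.mpr (Or.inl hk)))]
    apply ih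
    · exact hflat.of_append_right
    · intro k hk
      by_contra h
      have h' : (gv.2.foldl (fun d vsc => d.insert vsc gv.1) d).contains k = true := by
        cases hc : (gv.2.foldl (fun d vsc => d.insert vsc gv.1) d).contains k
        · exact absurd hc h
        · rfl
      rcases (contains_inner_foldl gv.1 gv.2 d k).mp h' with hmem | hd
      · exact hsplit.2.2 k hmem k hk rfl
      · have := hfresh k (by rw [List.flatMap_cons]; exact List.mem_append.mpr (Or.inr hk))
        simp [this] at hd

-- ===== VERDICT (by name: the statement is the Claim_ definition above) =====
theorem invert_concordance_spec : Claim_equal_invert_concordance := by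
  intro groups _ hpre
  unfold Spec_invert_concordance invert_concordance invert_concordance_alt
  have hset : PySem.Set.ofList (groups.flatMap (·.2)) = groups.flatMap (·.2) :=
    PySem.Set.ofList_eq_self_of_nodup _ hpre
  rw [foldA_eq groups PySem.Dict.empty hpre (fun k _ => by simp)]
  simp [hset]
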